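-- pv_equiv track=rewrite | github.com/MathieuDarsigny/dev1IFT3275 | q2.py | max_2_ignore
-- ===== SOURCE A (Python) =====
-- def max_2_ignore(lst, ignore_set=None):
--     max1, max2 = -1, -1
--     max1_index, max2_index = -1, -1
--     if ignore_set is None:
--         for i, value in enumerate(lst):
--
--             if value > max1:
--                 max2 = max1
--                 max2_index = max1_index
--                 max1 = value
--                 max1_index = i
--             elif value > max2:
--                 max2 = value
--                 max2_index = i
--     else:
--         for i, value in enumerate(lst):
--             if i in ignore_set:
--                 continue
--
--             if value > max1:
--                 max2 = max1
--                 max2_index = max1_index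
--                 max1 = value
--                 max1_index = i
--             elif value > max2:
--                 max2 = value
--                 max2_index = i
--
--     return max1, max2, max1_index, max2_index
-- ===== SOURCE B (Python) =====
-- def max_2_ignore(lst, ignore_set=None):
--     ig = ignore_set if ignore_set is not None else ()
--     max1, max1_index = -1, -1
--     for i, v in enumerate(lst):
--         if i not in ig and v > max1:
--             max1, max1_index = v, i
--     max2, max2_index = -1, -1
--     for i, v in enumerate(lst):
--         if i not in ig and i != max1_index and v > max2:
--             max2, max2_index = v, i
--     return max1, max2, max1_index, max2_index
-- ===== Notes on version B (the rewrite author's own statement) =====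
-- stated objective: simpler
-- what changed: Replaced A's single scan carrying a coupled running top-2 state (max1, max2 and both indices updated together) by two independent simple max scans: pass 1 finds the max and its first index among non-ignored positions, pass 2 repeats the same scan additionally skipping that one index.
import Mathlib
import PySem

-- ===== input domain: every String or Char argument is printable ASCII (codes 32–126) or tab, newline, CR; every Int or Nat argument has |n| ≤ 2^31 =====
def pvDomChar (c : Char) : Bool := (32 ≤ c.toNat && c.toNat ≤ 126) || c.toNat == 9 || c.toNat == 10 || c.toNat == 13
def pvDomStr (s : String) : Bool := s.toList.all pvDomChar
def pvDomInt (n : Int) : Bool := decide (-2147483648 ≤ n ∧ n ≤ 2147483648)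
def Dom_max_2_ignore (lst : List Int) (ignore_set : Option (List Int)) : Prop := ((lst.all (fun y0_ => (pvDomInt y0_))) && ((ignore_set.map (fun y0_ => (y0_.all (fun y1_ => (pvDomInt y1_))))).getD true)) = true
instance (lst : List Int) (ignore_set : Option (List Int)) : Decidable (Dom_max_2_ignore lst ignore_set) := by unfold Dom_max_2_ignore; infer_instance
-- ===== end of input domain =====

-- B replaces A's single running top-2 scan by two simple max scans (pass 1: max and its first
-- index over non-ignored positions; pass 2: the same scan skipping that index); objective:
-- simpler decomposition, same cost.

-- ===== PORT A =====
-- A's one loop, state (max1, max2, max1_index, max2_index); the two Python branches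
-- (ignore_set is None / not None) stay separate branches.
def max_2_ignore (lst : List Int) (ignore_set : Option (List Int)) : Int × Int × Int × Int :=
  match ignore_set with
  | none =>
      (PySem.List.enumerate lst).foldl
        (fun (st : Int × Int × Int × Int) (p : Int × Int) =>
          if p.2 > st.1 then (p.2, st.1, p.1, st.2.2.1)
          else if p.2 > st.2.1 then (st.1, p.2, st.2.2.1, p.1)
          else st)
        (-1, -1, -1, -1)
  | some ig =>
      (PySem.List.enumerate lst).foldl
        (fun (st : Int × Int × Int × Int) (p : Int × Int) =>
          if ig.contains p.1 then st
          else if p.2 > st.1 then (p.2, st.1, p.1, st.2.2.1)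
          else if p.2 > st.2.1 then (st.1, p.2, st.2.2.1, p.1)
          else st)
        (-1, -1, -1, -1)

-- ===== PORT B =====
-- two passes: pass 1 finds the max and its first index; pass 2 repeats the scan skipping that index
def max_2_ignore_alt (lst : List Int) (ignore_set : Option (List Int)) : Int × Int × Int × Int :=
  let ig := ignore_set.getD []
  let best :=
    (PySem.List.enumerate lst).foldl
      (fun (st : Int × Int) (p : Int × Int) =>
        if ig.contains p.1 = false ∧ p.2 > st.1 then (p.2, p.1) else st)
      (-1, -1)
  let second :=
    (PySem.List.enumerate lst).foldl
      (fun (st : Int × Int) (p : Int × Int) =>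
        if ig.contains p.1 = false ∧ p.1 ≠ best.2 ∧ p.2 > st.1 then (p.2, p.1) else st)
      (-1, -1)
  (best.1, second.1, best.2, second.2)

-- ===== PRECONDITION & SPEC =====
def Spec_max_2_ignore (lst : List Int) (ignore_set : Option (List Int)) (out : Int × Int × Int × Int) : Prop := out = max_2_ignore_alt lst ignore_set
instance (lst : List Int) (ignore_set : Option (List Int)) (out : Int × Int × Int × Int) : Decidable (Spec_max_2_ignore lst ignore_set out) := by unfold Spec_max_2_ignore; infer_instance

-- ===== CLAIM (what is proved, stated in full; the proofs are below) =====
def Claim_equal_max_2_ignore : Prop := ∀ (lst : List Int) (ignore_set : Option (List Int)), Dom_max_2_ignore lst ignore_set → Spec_max_2_ignore lst ignore_set (max_2_ignore lst ignore_set)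

-- ===== LEMMAS AND PROOFS =====

-- generic versions of the three loops, parameterised by the skip test
def pvF1 (skip : Int → Bool) (e : List (Int × Int)) (st : Int × Int) : Int × Int :=
  e.foldl (fun st p => if skip p.1 = false ∧ p.2 > st.1 then (p.2, p.1) else st) st

def pvF2 (skip : Int → Bool) (j : Int) (e : List (Int × Int)) (st : Int × Int) : Int × Int :=
  e.foldl (fun st p => if skip p.1 = false ∧ p.1 ≠ j ∧ p.2 > st.1 then (p.2, p.1) else st) st

def pvFA (skip : Int → Bool) (e : List (Int × Int)) (st : Int × Int × Int × Int) : Int × Int × Int × Int :=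
  e.foldl
    (fun (st : Int × Int × Int × Int) (p : Int × Int) =>
      if skip p.1 then st
      else if p.2 > st.1 then (p.2, st.1, p.1, st.2.2.1)
      else if p.2 > st.2.1 then (st.1, p.2, st.2.2.1, p.1)
      else st)
    st

theorem pvF1_snoc (skip : Int → Bool) (q : Int × Int) (e : List (Int × Int)) (st : Int × Int) :
    pvF1 skip (e ++ [q]) st =
      (if skip q.1 = false ∧ q.2 > (pvF1 skip e st).1 then (q.2, q.1) else pvF1 skip e st) := by
  simp [pvF1, List.foldl_append]

theorem pvF2_snoc (skip : Int → Bool) (j : Int) (q : Int × Int) (e : List (Int × Int)) (st : Int × Int) :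
    pvF2 skip j (e ++ [q]) st =
      (if skip q.1 = false ∧ q.1 ≠ j ∧ q.2 > (pvF2 skip j e st).1 then (q.2, q.1) else pvF2 skip j e st) := by
  simp [pvF2, List.foldl_append]

theorem pvFA_snoc (skip : Int → Bool) (q : Int × Int) (e : List (Int × Int)) (st : Int × Int × Int × Int) :
    pvFA skip (e ++ [q]) st =
      (if skip q.1 then pvFA skip e st
       else if q.2 > (pvFA skip e st).1 then (q.2, (pvFA skip e st).1, q.1, (pvFA skip e st).2.2.1)
       else if q.2 > (pvFA skip e st).2.1 then ((pvFA skip e st).1, q.2, (pvFA skip e st).2.2.1, q.1)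
       else pvFA skip e st) := by
  simp [pvFA, List.foldl_append]

theorem pvF1_index_bound (skip : Int → Bool) (c : Int) :
    ∀ (e : List (Int × Int)) (st : Int × Int), st.2 < c → (∀ p ∈ e, p.1 < c) →
      (pvF1 skip e st).2 < c := by
  intro e
  induction e with
  | nil => intro st h _; simpa [pvF1] using h
  | cons p e ih =>
      intro st h hall
      simp only [pvF1, List.foldl_cons]
      split
      · exact ih _ (hall p (by simp)) (fun q hq => hall q (by simp [hq]))
      · exact ih _ h (fun q hq => hall q (by simp [hq]))

theorem pvF2_eq_pvF1 (skip : Int → Bool) (j : Int) :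
    ∀ (e : List (Int × Int)) (st : Int × Int), (∀ p ∈ e, p.1 ≠ j) →
      pvF2 skip j e st = pvF1 skip e st := by
  intro e
  induction e with
  | nil => intro st _; rfl
  | cons p e ih =>
      intro st hall
      simp only [pvF2, pvF1, List.foldl_cons] at *
      have hpj : p.1 ≠ j := hall p (by simp)
      by_cases h1 : skip p.1 = false ∧ p.2 > st.1
      · rw [if_pos ⟨h1.1, hpj, h1.2⟩, if_pos h1]
        exact ih _ (fun q hq => hall q (by simp [hq]))
      · have : ¬ (skip p.1 = false ∧ p.1 ≠ j ∧ p.2 > st.1) := by tauto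
        rw [if_neg this, if_neg h1]
        exact ih _ (fun q hq => hall q (by simp [hq]))

theorem pv_enum_index_lt (lst : List Int) :
    ∀ p ∈ PySem.List.enumerate lst, p.1 < (lst.length : Int) := by
  intro p hp
  rcases (PySem.List.mem_enumerate_iff lst 0 p).1 hp with ⟨k, hk, rfl⟩
  have : (k : Int) < (lst.length : Int) := by exact_mod_cast hk
  simpa using this

-- the key invariant: A's single scan computes exactly B's two passes
theorem pv_main (skip : Int → Bool) (lst : List Int) :
    pvFA skip (PySem.List.enumerate lst) (-1, -1, -1, -1) =
      ((pvF1 skip (PySem.List.enumerate lst) (-1, -1)).1,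
       (pvF2 skip (pvF1 skip (PySem.List.enumerate lst) (-1, -1)).2 (PySem.List.enumerate lst) (-1, -1)).1,
       (pvF1 skip (PySem.List.enumerate lst) (-1, -1)).2,
       (pvF2 skip (pvF1 skip (PySem.List.enumerate lst) (-1, -1)).2 (PySem.List.enumerate lst) (-1, -1)).2) := by
  induction lst using List.reverseRecOn with
  | nil => rfl
  | append_singleton l x ih =>
      have henum : PySem.List.enumerate (l ++ [x]) =
          PySem.List.enumerate l ++ [((l.length : Int), x)] := by
        simp [PySem.List.enumerate_append, PySem.List.enumerate_cons, PySem.List.enumerate_nil]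
      set e := PySem.List.enumerate l with he
      set n : Int := (l.length : Int) with hn
      have hlt : ∀ p ∈ e, p.1 < n := pv_enum_index_lt l
      have hne : ∀ p ∈ e, p.1 ≠ n := fun p hp => ne_of_lt (hlt p hp)
      have hn0 : (-1 : Int) < n := by
        have := Int.natCast_nonneg l.length
        omega
      have hMlt : (pvF1 skip e (-1, -1)).2 < n :=
        pvF1_index_bound skip n e (-1, -1) hn0 hlt
      rw [henum, pvFA_snoc, pvF1_snoc, ih]
      by_cases hskip : skip n
      · have hc1 : ¬ (skip n = false ∧ x > (pvF1 skip e (-1, -1)).1) := by simp [hskip]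
        rw [if_pos hskip, if_neg hc1, pvF2_snoc,
          if_neg (show ¬ (skip n = false ∧ n ≠ (pvF1 skip e (-1, -1)).2 ∧
            x > (pvF2 skip (pvF1 skip e (-1, -1)).2 e (-1, -1)).1) by simp [hskip])]
      · have hsf : skip n = false := by simpa using hskip
        rw [if_neg hskip]
        by_cases h1 : x > (pvF1 skip e (-1, -1)).1
        · rw [if_pos h1, if_pos ⟨hsf, h1⟩]
          rw [pvF2_snoc, if_neg (show ¬ (skip n = false ∧ n ≠ n ∧
              x > (pvF2 skip n e (-1, -1)).1) by simp),
            pvF2_eq_pvF1 skip n e (-1, -1) hne]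
        · rw [if_neg h1, if_neg (show ¬ (skip n = false ∧ x > (pvF1 skip e (-1, -1)).1) by tauto),
            pvF2_snoc]
          by_cases h2 : x > (pvF2 skip (pvF1 skip e (-1, -1)).2 e (-1, -1)).1
          · rw [if_pos h2, if_pos ⟨hsf, ne_of_gt hMlt, h2⟩]
          · rw [if_neg h2, if_neg (show ¬ (skip n = false ∧ n ≠ (pvF1 skip e (-1, -1)).2 ∧
                x > (pvF2 skip (pvF1 skip e (-1, -1)).2 e (-1, -1)).1) by tauto)]

-- A's None branch is the skip-nothing instance of pvFA
theorem pvFA_false (e : List (Int × Int)) (st : Int × Int × Int × Int) :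
    (e.foldl
      (fun (st : Int × Int × Int × Int) (p : Int × Int) =>
        if p.2 > st.1 then (p.2, st.1, p.1, st.2.2.1)
        else if p.2 > st.2.1 then (st.1, p.2, st.2.2.1, p.1)
        else st) st) = pvFA (fun _ => false) e st := by
  simp [pvFA]

-- ===== VERDICT (by name: the statement is the Claim_ definition above) =====
theorem max_2_ignore_spec : Claim_equal_max_2_ignore := by
  intro lst ignore_set _
  unfold Spec_max_2_ignore
  cases ignore_set with
  | none =>
      show max_2_ignore lst none = max_2_ignore_alt lst none
      have hL : max_2_ignore lst none =
          pvFA (fun _ => false) (PySem.List.enumerate lst) (-1, -1, -1, -1) := by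
        show (PySem.List.enumerate lst).foldl _ _ = _
        exact pvFA_false _ _
      rw [hL, pv_main (fun _ => false) lst]
      rfl
  | some ig =>
      show max_2_ignore lst (some ig) = max_2_ignore_alt lst (some ig)
      have hL : max_2_ignore lst (some ig) =
          pvFA (fun i => ig.contains i) (PySem.List.enumerate lst) (-1, -1, -1, -1) := rfl
      rw [hL, pv_main (fun i => ig.contains i) lst]
      rfl
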